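-- pv_equiv track=rewrite | github.com/Mdbaker19/python-aoc-2022 | day03/answers.py | getMatchChar
-- ===== SOURCE A (Python) =====
-- def getMatchChar(first_half, second_half):
--     match = ''
--     for a, c in zip(first_half, second_half):
--         if second_half.find(a) >= 0:
--             match = a
--         elif first_half.find(c) >= 0:
--             match = c
--
--     return match
-- ===== SOURCE B (Python) =====
-- def getMatchChar(first_half, second_half):
--     n = min(len(first_half), len(second_half))
--     for i in range(n - 1, -1, -1):
--         if first_half[i] in second_half:
--             return first_half[i]
--         if second_half[i] in first_half:
--             return second_half[i]
--     return ''
-- ===== Notes on version B (the rewrite author's own statement) =====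
-- stated objective: faster
-- what changed: Replaces A's forward full scan with an overwritten accumulator by a reverse index scan over the shared prefix that returns the first (i.e. last-index) match early, dropping the accumulator entirely.
import Mathlib
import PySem

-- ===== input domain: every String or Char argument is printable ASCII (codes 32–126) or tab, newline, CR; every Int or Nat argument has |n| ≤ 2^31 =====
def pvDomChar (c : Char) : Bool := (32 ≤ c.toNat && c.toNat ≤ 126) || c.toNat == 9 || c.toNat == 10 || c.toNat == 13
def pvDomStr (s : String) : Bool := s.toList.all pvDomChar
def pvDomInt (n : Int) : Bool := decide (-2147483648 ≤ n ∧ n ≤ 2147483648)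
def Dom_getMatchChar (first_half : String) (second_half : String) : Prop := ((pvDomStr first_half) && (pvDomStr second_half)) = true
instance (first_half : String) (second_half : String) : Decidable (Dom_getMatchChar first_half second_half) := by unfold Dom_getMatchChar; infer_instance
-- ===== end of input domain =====

-- B replaces A's forward scan with an accumulator by a reverse index scan with early exit (alternative decomposition, same result).

-- ===== PORT A =====
-- A: forward pass over zip(first_half, second_half), overwriting `match` whenever a condition fires.
def getMatchChar (first_half : String) (second_half : String) : String :=
  (first_half.toList.zip second_half.toList).foldl
    (fun m p =>
      if 0 ≤ PySem.Str.find second_half (String.ofList [p.1]) then String.ofList [p.1]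
      else if 0 ≤ PySem.Str.find first_half (String.ofList [p.2]) then String.ofList [p.2]
      else m) ""

-- ===== PORT B =====
-- B's loop `for i in range(n-1, -1, -1)` as countdown recursion; the `getD`
-- default is a totality guard only (i is always in range when called).
def pvAltLoop (first_half : String) (second_half : String) : Nat → String
  | 0 => ""
  | i+1 =>
    let a := first_half.toList.getD i ' '
    let c := second_half.toList.getD i ' '
    if PySem.Str.isIn (String.ofList [a]) second_half then String.ofList [a]
    else if PySem.Str.isIn (String.ofList [c]) first_half then String.ofList [c]
    else pvAltLoop first_half second_half i

def getMatchChar_alt (first_half : String) (second_half : String) : String :=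
  pvAltLoop first_half second_half (min first_half.toList.length second_half.toList.length)

-- ===== PRECONDITION & SPEC =====
def Spec_getMatchChar (first_half : String) (second_half : String) (out : String) : Prop := out = getMatchChar_alt first_half second_half
instance (first_half : String) (second_half : String) (out : String) : Decidable (Spec_getMatchChar first_half second_half out) := by unfold Spec_getMatchChar; infer_instance

-- ===== CLAIM (what is proved, stated in full; the proofs are below) =====
def Claim_equal_getMatchChar : Prop := ∀ (first_half : String) (second_half : String), Dom_getMatchChar first_half second_half → Spec_getMatchChar first_half second_half (getMatchChar first_half second_half)

-- ===== LEMMAS AND PROOFS =====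

-- a single char is an infix iff it is a member
theorem pv_singleton_infix_iff {c : Char} {l : List Char} : [c] <:+: l ↔ c ∈ l := by
  constructor
  · intro h
    exact (List.singleton_sublist).mp h.sublist
  · intro h
    obtain ⟨s, t, rfl⟩ := List.append_of_mem h
    exact ⟨s, t, by simp⟩

-- both membership tests decide `c ∈ s.toList`
theorem pv_find_cond (s : String) (c : Char) :
    (0 ≤ PySem.Str.find s (String.ofList [c])) ↔ c ∈ s.toList := by
  have h : (String.ofList [c]).toList = [c] := by simp
  rw [show PySem.Str.find s (String.ofList [c]) = PySem.Chars.find s.toList [c] from by simp [h]]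
  rw [PySem.Chars.find_nonneg_iff]
  exact pv_singleton_infix_iff

theorem pv_isIn_cond (s : String) (c : Char) :
    (PySem.Str.isIn (String.ofList [c]) s = true) ↔ c ∈ s.toList := by
  have h : (String.ofList [c]).toList = [c] := by simp
  rw [show PySem.Str.isIn (String.ofList [c]) s = PySem.Chars.isIn [c] s.toList from by simp [h]]
  rw [PySem.Chars.isIn_iff_infix]
  exact pv_singleton_infix_iff

theorem pv_loop_eq (first_half second_half : String) :
    ∀ i, i ≤ (first_half.toList.zip second_half.toList).length →
      ((first_half.toList.zip second_half.toList).take i).foldl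
        (fun m p =>
          if 0 ≤ PySem.Str.find second_half (String.ofList [p.1]) then String.ofList [p.1]
          else if 0 ≤ PySem.Str.find first_half (String.ofList [p.2]) then String.ofList [p.2]
          else m) ""
      = pvAltLoop first_half second_half i := by
  intro i
  induction i with
  | zero => intro _; simp [pvAltLoop]
  | succ i ih =>
    intro hle
    have hi : i < (first_half.toList.zip second_half.toList).length := by omega
    have hz : (first_half.toList.zip second_half.toList).length
        = min first_half.toList.length second_half.toList.length := by
      rw [List.length_zip]
    have hi1 : i < first_half.toList.length := by rw [hz] at hi; omega
    have hi2 : i < second_half.toList.length := by rw [hz] at hi; omega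
    have htake : (first_half.toList.zip second_half.toList).take (i+1)
        = (first_half.toList.zip second_half.toList).take i
          ++ [(first_half.toList[i], second_half.toList[i])] := by
      rw [List.take_succ]
      simp [List.getElem?_eq_getElem hi, List.getElem_zip]
    rw [htake, List.foldl_append, ih (by omega)]
    show (if 0 ≤ PySem.Str.find second_half (String.ofList [first_half.toList[i]])
            then String.ofList [first_half.toList[i]]
          else if 0 ≤ PySem.Str.find first_half (String.ofList [second_half.toList[i]])
            then String.ofList [second_half.toList[i]]
          else pvAltLoop first_half second_half i)
        = pvAltLoop first_half second_half (i+1)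
    rw [pvAltLoop]
    simp only [List.getD_eq_getElem _ _ hi1, List.getD_eq_getElem _ _ hi2]
    exact if_congr (Iff.trans (pv_find_cond _ _) (pv_isIn_cond _ _).symm) rfl
      (if_congr (Iff.trans (pv_find_cond _ _) (pv_isIn_cond _ _).symm) rfl rfl)

-- ===== VERDICT (by name: the statement is the Claim_ definition above) =====
theorem getMatchChar_spec : Claim_equal_getMatchChar := by
  intro first_half second_half _
  unfold Spec_getMatchChar getMatchChar getMatchChar_alt
  have hlen : (first_half.toList.zip second_half.toList).length
      = min first_half.toList.length second_half.toList.length := by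
    rw [List.length_zip]
  have h := pv_loop_eq first_half second_half
      (first_half.toList.zip second_half.toList).length le_rfl
  rw [List.take_length] at h
  rw [h, hlen]
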